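-- pv_equiv track=rewrite | github.com/ryong9rrr/coding-test-python | 1_카카오/프로그래머스Lv3-[3차] 방금그곡.py | replace_molody
-- ===== SOURCE A (Python) =====
-- def replace_molody(melody):
--     special_melodies = [
--         ["C#", "c"],
--         ["D#", "d"],
--         ["F#", "f"],
--         ["G#", "g"],
--         ["A#", "a"],
--       ]
--     for origin, replaced in special_melodies:
--         melody = melody.replace(origin, replaced)
--     return melody
-- ===== SOURCE B (Python) =====
-- def replace_molody(melody):
--     table = {"C#": "c", "D#": "d", "F#": "f", "G#": "g", "A#": "a"}
--     out = []
--     i = 0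
--     n = len(melody)
--     while i < n:
--         r = table.get(melody[i:i+2])
--         if r is not None:
--             out.append(r)
--             i += 2
--         else:
--             out.append(melody[i])
--             i += 1
--     return "".join(out)
-- ===== Notes on version B (the rewrite author's own statement) =====
-- stated objective: alternative
-- what changed: replaces five sequential str.replace passes by a single left-to-right scan with an explicit index and a {two-char sharp: lowercase} lookup table, emitting into a result list joined once
import Mathlib
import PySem

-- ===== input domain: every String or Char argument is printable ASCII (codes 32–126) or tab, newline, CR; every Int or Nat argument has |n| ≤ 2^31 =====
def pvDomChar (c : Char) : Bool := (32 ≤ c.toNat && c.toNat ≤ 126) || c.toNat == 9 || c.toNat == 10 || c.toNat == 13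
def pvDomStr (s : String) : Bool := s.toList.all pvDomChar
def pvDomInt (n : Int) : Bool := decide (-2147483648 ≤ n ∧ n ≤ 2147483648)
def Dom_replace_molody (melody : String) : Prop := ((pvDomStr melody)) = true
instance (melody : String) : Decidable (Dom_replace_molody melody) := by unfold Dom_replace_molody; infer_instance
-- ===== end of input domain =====

-- B replaces the five sequential str.replace passes of A by one left-to-right scan with a
-- two-character lookup table (objective: alternative single-pass algorithm, same result).

-- ===== PORT A =====
def replace_molody (melody : String) : String :=
  -- for origin, replaced in special_melodies: melody = melody.replace(origin, replaced)
  let m1 := PySem.Str.replace melody "C#" "c"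
  let m2 := PySem.Str.replace m1 "D#" "d"
  let m3 := PySem.Str.replace m2 "F#" "f"
  let m4 := PySem.Str.replace m3 "G#" "g"
  let m5 := PySem.Str.replace m4 "A#" "a"
  m5

-- ===== PORT B =====
-- the dict {"C#":"c","D#":"d","F#":"f","G#":"g","A#":"a"} as an association list (insertion order)
def pvTable : List (List Char × Char) :=
  [(['C','#'], 'c'), (['D','#'], 'd'), (['F','#'], 'f'), (['G','#'], 'g'), (['A','#'], 'a')]

-- the while-loop: i indexes into the char list; melody[i:i+2] is c :: rest.take 1
def pvScan : List Char → List Char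
  | [] => []
  | c :: rest =>
    match pvTable.lookup (c :: rest.take 1) with
    | some r => r :: pvScan (rest.drop 1)
    | none   => c :: pvScan rest
termination_by l => l.length
decreasing_by all_goals (simp; try omega)

def replace_molody_alt (melody : String) : String :=
  String.ofList (pvScan melody.toList)

-- ===== PRECONDITION & SPEC =====
def Spec_replace_molody (melody : String) (out : String) : Prop := out = replace_molody_alt melody
instance (melody : String) (out : String) : Decidable (Spec_replace_molody melody out) := by unfold Spec_replace_molody; infer_instance

-- ===== CLAIM (what is proved, stated in full; the proofs are below) =====
def Claim_equal_replace_molody : Prop := ∀ (melody : String), Dom_replace_molody melody → Spec_replace_molody melody (replace_molody melody)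

-- ===== LEMMAS AND PROOFS =====

-- simple recursive characterisation of one replace pass for a pattern [x, '#'] → [r]
def rep (x r : Char) : List Char → List Char
  | [] => []
  | [c] => [c]
  | c :: d :: t => if c = x ∧ d = '#' then r :: rep x r t else c :: rep x r (d :: t)
termination_by l => l.length

theorem go_eq_rep (x r : Char) : ∀ (fuel : Nat) (l acc : List Char), l.length ≤ fuel →
    PySem.Chars.replace.go [x, '#'] [r] fuel l acc = acc.reverse ++ rep x r l := by
  intro fuel
  induction fuel with
  | zero =>
    intro l acc h
    have : l = [] := by cases l <;> simp_all
    subst this; simp [PySem.Chars.replace.go, rep]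
  | succ n ih =>
    intro l acc h
    match l with
    | [] => simp [PySem.Chars.replace.go, rep]
    | [c] =>
      have hpre : ([x, '#'].isPrefixOf [c]) = false := by
        simp [List.isPrefixOf]
      simp only [PySem.Chars.replace.go, hpre, Bool.false_eq_true, if_false]
      rw [ih [] (c :: acc) (by simp)]
      simp [rep]
    | c :: d :: t =>
      by_cases hcd : c = x ∧ d = '#'
      · have hpre : ([x, '#'].isPrefixOf (c :: d :: t)) = true := by
          simp [List.isPrefixOf, hcd.1, hcd.2]
        simp only [PySem.Chars.replace.go, hpre, if_true]
        rw [show List.drop [x, '#'].length (c :: d :: t) = t from rfl]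
        rw [ih t ([r].reverse ++ acc) (by simp at h ⊢; omega)]
        simp [rep, hcd.1, hcd.2]
      · have hpre : ([x, '#'].isPrefixOf (c :: d :: t)) = false := by
          simp [List.isPrefixOf]; tauto
        simp only [PySem.Chars.replace.go, hpre, Bool.false_eq_true, if_false]
        rw [ih (d :: t) (c :: acc) (by simp at h ⊢; omega)]
        simp [rep, hcd]

theorem replace_eq_rep (x r : Char) (l : List Char) :
    PySem.Chars.replace l [x, '#'] [r] = rep x r l := by
  rw [PySem.Chars.replace]
  simp only [List.isEmpty_cons, Bool.false_eq_true, if_false]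
  rw [go_eq_rep x r l.length l [] le_rfl]
  simp

-- a pass leaves a head alone when the head is not the pattern's letter
theorem rep_cons_ne {c x : Char} (r : Char) (t : List Char) (h : c ≠ x) :
    rep x r (c :: t) = c :: rep x r t := by
  match t with
  | [] => simp [rep]
  | d :: t' => simp [rep, h]

-- …or when the next character is not '#'
theorem rep_cons_headne {X : List Char} (c x r : Char) (h : X.headD 'x' ≠ '#') :
    rep x r (c :: X) = c :: rep x r X := by
  match X with
  | [] => simp [rep]
  | e :: X' =>
    simp at h
    simp [rep, h]

-- the five passes of A, in A's order
def comp5 (l : List Char) : List Char :=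
  rep 'A' 'a' (rep 'G' 'g' (rep 'F' 'f' (rep 'D' 'd' (rep 'C' 'c' l))))

-- the head of a pass's output is never '#' when neither input head nor replacement is
theorem rep_headD_ne (x r : Char) (X : List Char) (hr : r ≠ '#') (h : X.headD 'x' ≠ '#') :
    (rep x r X).headD 'x' ≠ '#' := by
  match X with
  | [] => simp [rep]
  | [e] => simpa [rep] using h
  | e :: e' :: X' =>
    simp only [rep]
    split_ifs with hif <;> simp_all

theorem lookup_none (c d : Char) (h1 : ¬(c = 'C' ∧ d = '#')) (h2 : ¬(c = 'D' ∧ d = '#'))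
    (h3 : ¬(c = 'F' ∧ d = '#')) (h4 : ¬(c = 'G' ∧ d = '#')) (h5 : ¬(c = 'A' ∧ d = '#')) :
    pvTable.lookup [c, d] = none := by
  have b1 : (c == 'C' && d == '#') = false := by
    cases hc : c == 'C' <;> cases hdb : d == '#' <;> simp_all
  have b2 : (c == 'D' && d == '#') = false := by
    cases hc : c == 'D' <;> cases hdb : d == '#' <;> simp_all
  have b3 : (c == 'F' && d == '#') = false := by
    cases hc : c == 'F' <;> cases hdb : d == '#' <;> simp_all
  have b4 : (c == 'G' && d == '#') = false := by
    cases hc : c == 'G' <;> cases hdb : d == '#' <;> simp_all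
  have b5 : (c == 'A' && d == '#') = false := by
    cases hc : c == 'A' <;> cases hdb : d == '#' <;> simp_all
  simp [pvTable, List.lookup, b1, b2, b3, b4, b5]

theorem comp5_eq_scan : ∀ l : List Char, comp5 l = pvScan l
  | [] => by simp [comp5, rep, pvScan]
  | [c] => by simp [comp5, rep, pvScan, pvTable, List.lookup]
  | c :: d :: t => by
    have ih1 := comp5_eq_scan t
    have ih2 := comp5_eq_scan (d :: t)
    by_cases h1 : c = 'C' ∧ d = '#'
    · obtain ⟨rfl, rfl⟩ := h1
      have hs : pvScan ('C' :: '#' :: t) = 'c' :: pvScan t := by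
        simp [pvScan, pvTable]
      rw [hs, ← ih1]; simp [comp5, rep, rep_cons_ne]
    · by_cases h2 : c = 'D' ∧ d = '#'
      · obtain ⟨rfl, rfl⟩ := h2
        have hs : pvScan ('D' :: '#' :: t) = 'd' :: pvScan t := by
          simp [pvScan, pvTable, List.lookup]
        rw [hs, ← ih1]; simp [comp5, rep, rep_cons_ne]
      · by_cases h3 : c = 'F' ∧ d = '#'
        · obtain ⟨rfl, rfl⟩ := h3
          have hs : pvScan ('F' :: '#' :: t) = 'f' :: pvScan t := by
            simp [pvScan, pvTable, List.lookup]
          rw [hs, ← ih1]; simp [comp5, rep, rep_cons_ne]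
        · by_cases h4 : c = 'G' ∧ d = '#'
          · obtain ⟨rfl, rfl⟩ := h4
            have hs : pvScan ('G' :: '#' :: t) = 'g' :: pvScan t := by
              simp [pvScan, pvTable, List.lookup]
            rw [hs, ← ih1]; simp [comp5, rep, rep_cons_ne]
          · by_cases h5 : c = 'A' ∧ d = '#'
            · obtain ⟨rfl, rfl⟩ := h5
              have hs : pvScan ('A' :: '#' :: t) = 'a' :: pvScan t := by
                simp [pvScan, pvTable, List.lookup]
              rw [hs, ← ih1]; simp [comp5, rep, rep_cons_ne]
            · have hnone := lookup_none c d h1 h2 h3 h4 h5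
              have hs : pvScan (c :: d :: t) = c :: pvScan (d :: t) := by
                simp [pvScan, hnone]
              rw [hs, ← ih2]
              by_cases hd : d = '#'
              · subst hd
                have hc1 : c ≠ 'C' := fun h => h1 ⟨h, rfl⟩
                have hc2 : c ≠ 'D' := fun h => h2 ⟨h, rfl⟩
                have hc3 : c ≠ 'F' := fun h => h3 ⟨h, rfl⟩
                have hc4 : c ≠ 'G' := fun h => h4 ⟨h, rfl⟩
                have hc5 : c ≠ 'A' := fun h => h5 ⟨h, rfl⟩
                simp [comp5, rep_cons_ne, hc1, hc2, hc3, hc4, hc5]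
              · have h0 : (d :: t).headD 'x' ≠ '#' := by simpa using hd
                have hC := rep_headD_ne 'C' 'c' (d :: t) (by decide) h0
                have hD := rep_headD_ne 'D' 'd' _ (by decide) hC
                have hF := rep_headD_ne 'F' 'f' _ (by decide) hD
                have hG := rep_headD_ne 'G' 'g' _ (by decide) hF
                unfold comp5
                rw [rep_cons_headne c 'C' 'c' h0, rep_cons_headne c 'D' 'd' hC,
                    rep_cons_headne c 'F' 'f' hD, rep_cons_headne c 'G' 'g' hF,
                    rep_cons_headne c 'A' 'a' hG]
  termination_by l => l.length

-- ===== VERDICT (by name: the statement is the Claim_ definition above) =====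
theorem replace_molody_spec : Claim_equal_replace_molody := by
  intro m _
  unfold Spec_replace_molody replace_molody replace_molody_alt
  have h : ∀ s : String, (PySem.Str.replace s "C#" "c").toList = rep 'C' 'c' s.toList := by
    intro s; rw [PySem.Str.toList_replace]; exact replace_eq_rep 'C' 'c' s.toList
  have htl : (PySem.Str.replace (PySem.Str.replace (PySem.Str.replace (PySem.Str.replace
      (PySem.Str.replace m "C#" "c") "D#" "d") "F#" "f") "G#" "g") "A#" "a").toList
      = comp5 m.toList := by
    simp only [PySem.Str.toList_replace]
    rw [show ("C#" : String).toList = ['C','#'] from rfl, show ("c" : String).toList = ['c'] from rfl,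
        show ("D#" : String).toList = ['D','#'] from rfl, show ("d" : String).toList = ['d'] from rfl,
        show ("F#" : String).toList = ['F','#'] from rfl, show ("f" : String).toList = ['f'] from rfl,
        show ("G#" : String).toList = ['G','#'] from rfl, show ("g" : String).toList = ['g'] from rfl,
        show ("A#" : String).toList = ['A','#'] from rfl, show ("a" : String).toList = ['a'] from rfl]
    rw [replace_eq_rep, replace_eq_rep, replace_eq_rep, replace_eq_rep, replace_eq_rep]
    rfl
  have := htl.trans (comp5_eq_scan m.toList)
  apply String.toList_injective
  rw [this]
  simp
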